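-- pv_equiv track=rewrite | github.com/rrherlih/programming311 | words.py | word_min
-- ===== SOURCE A (Python) =====
-- def word_min(word):
-- 	if len(word) == 1:
-- 		return word[0]
-- 	elif len(word) == 2:
-- 		if (word[0] <= word[1]):
-- 			return word[0]
-- 		else:
-- 			return word[1]
-- 	else:
-- 		mins = ""
-- 		for i in range(0, len(word)//2 + 1):
-- 			if word[i] <= word[len(word) - 1 - i]:
-- 				mins = mins + word[i]
-- 			else:
-- 				mins = mins + word[len(word) - 1 - i]
-- 		return(word_min(mins))
-- ===== SOURCE B (Python) =====
-- def word_min(word):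
--     smallest = word[0]
--     for ch in word:
--         if ch < smallest:
--             smallest = ch
--     return smallest
-- ===== Notes on version B (the rewrite author's own statement) =====
-- stated objective: faster
-- what changed: Replaces A's recursive pairwise tournament (rebuilding a 'mins' string by concatenation each round and recursing) with a single linear scan keeping the running minimum character.
import Mathlib
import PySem

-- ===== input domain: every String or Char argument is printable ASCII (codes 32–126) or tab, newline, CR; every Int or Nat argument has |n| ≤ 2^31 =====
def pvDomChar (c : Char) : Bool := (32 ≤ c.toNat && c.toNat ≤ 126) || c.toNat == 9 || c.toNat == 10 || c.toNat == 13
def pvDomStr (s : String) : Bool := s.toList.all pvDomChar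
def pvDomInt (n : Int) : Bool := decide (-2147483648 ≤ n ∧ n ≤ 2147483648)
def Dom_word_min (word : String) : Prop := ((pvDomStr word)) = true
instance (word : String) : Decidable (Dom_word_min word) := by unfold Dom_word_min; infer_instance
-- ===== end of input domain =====

-- B replaces A's recursive pairwise tournament with a single linear running-minimum scan (simpler; same result).


-- ===== PORT A =====
-- Transliteration of A on List Char; fuel (initially the word length) only makes the
-- recursion structurally total — on every input Pre_ admits it never runs out (proved below).
def wmA (fuel : Nat) (w : List Char) : List Char :=
  match fuel with
  | 0 => []
  | fuel + 1 =>
    if w.length = 1 then [(PySem.List.pyGetD w 0 ' ')]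
    else if w.length = 2 then
      if PySem.List.pyGetD w 0 ' ' ≤ PySem.List.pyGetD w 1 ' ' then [PySem.List.pyGetD w 0 ' ']
      else [PySem.List.pyGetD w 1 ' ']
    else
      let n : Int := w.length
      let mins := (PySem.List.pyRange 0 (PySem.Int.floordiv n 2 + 1) 1).foldl
        (fun acc i =>
          if PySem.List.pyGetD w i ' ' ≤ PySem.List.pyGetD w (n - 1 - i) ' '
          then acc ++ [PySem.List.pyGetD w i ' ']
          else acc ++ [PySem.List.pyGetD w (n - 1 - i) ' ']) []
      wmA fuel mins

def word_min (word : String) : String := String.ofList (wmA word.toList.length word.toList)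

-- ===== PORT B =====
-- smallest = word[0]; for ch in word: if ch < smallest: smallest = ch; return smallest
def word_min_alt (word : String) : String :=
  match word.toList with
  | [] => ""   -- Python raises IndexError here; excluded by Pre_
  | c :: _ =>
    String.ofList [word.toList.foldl (fun smallest ch => if ch < smallest then ch else smallest) c]

-- ===== PRECONDITION & SPEC =====
-- Pre_ excludes only the empty string, on which both A and B raise IndexError (word[0]).
def Pre_word_min (word : String) : Prop := word ≠ ""
instance (word : String) : Decidable (Pre_word_min word) := by unfold Pre_word_min; infer_instance
def pvWitness_word_min : String := ("bca")

def Spec_word_min (word : String) (out : String) : Prop := out = word_min_alt word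
instance (word : String) (out : String) : Decidable (Spec_word_min word out) := by unfold Spec_word_min; infer_instance

-- ===== CLAIM (what is proved, stated in full; the proofs are below) =====
def Claim_equal_word_min : Prop := ∀ (word : String), Dom_word_min word → Pre_word_min word → Spec_word_min word (word_min word)

-- ===== LEMMAS AND PROOFS =====

-- one round of A's tournament, as a map over the index range
theorem wmA_mins_eq_map (w : List Char) (m : Int) :
    (PySem.List.pyRange 0 m 1).foldl
      (fun acc i =>
        if PySem.List.pyGetD w i ' ' ≤ PySem.List.pyGetD w ((w.length : Int) - 1 - i) ' '
        then acc ++ [PySem.List.pyGetD w i ' ']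
        else acc ++ [PySem.List.pyGetD w ((w.length : Int) - 1 - i) ' ']) []
    = (PySem.List.pyRange 0 m 1).map
        (fun i => min (PySem.List.pyGetD w i ' ') (PySem.List.pyGetD w ((w.length : Int) - 1 - i) ' ')) := by
  rw [show (fun acc i =>
        if PySem.List.pyGetD w i ' ' ≤ PySem.List.pyGetD w ((w.length : Int) - 1 - i) ' '
        then acc ++ [PySem.List.pyGetD w i ' ']
        else acc ++ [PySem.List.pyGetD w ((w.length : Int) - 1 - i) ' '])
      = (fun (acc : List Char) i => acc ++
          [min (PySem.List.pyGetD w i ' ') (PySem.List.pyGetD w ((w.length : Int) - 1 - i) ' ')])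
    from by funext acc i; rw [min_def]; split_ifs <;> rfl]
  exact PySem.List.foldl_append_singleton_eq_map _ _ _

-- the minimum survives one round of A's tournament
theorem mins_min?_eq (w : List Char) (a : Char) (h3 : 3 ≤ w.length) (hmin : w.min? = some a) :
    ((PySem.List.pyRange 0 ((w.length : Int) / 2 + 1) 1).map
      (fun i => min (PySem.List.pyGetD w i ' ') (PySem.List.pyGetD w ((w.length : Int) - 1 - i) ' '))).min?
    = some a := by
  rw [List.min?_eq_some_iff] at hmin ⊢
  obtain ⟨hmem, hle⟩ := hmin
  have hsub : ∀ i : Int, 0 ≤ i → i < (w.length : Int) / 2 + 1 →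
      min (PySem.List.pyGetD w i ' ') (PySem.List.pyGetD w ((w.length : Int) - 1 - i) ' ') ∈ w := by
    intro i h0 hi
    rcases min_choice (PySem.List.pyGetD w i ' ') (PySem.List.pyGetD w ((w.length : Int) - 1 - i) ' ') with h | h <;>
      rw [h] <;> exact PySem.List.pyGetD_mem _ _ (by simp [PySem.Raise.InRange]; omega)
  constructor
  · -- a appears in the mapped list
    obtain ⟨j, hj, hja⟩ := List.getElem_of_mem hmem
    set i : Int := min (j : Int) ((w.length : Int) - 1 - j) with hidef
    have h0i : 0 ≤ i := by simp [hidef]; omega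
    have hilt : i < (w.length : Int) / 2 + 1 := by
      rcases min_le_iff.mp (le_refl i) with _ | _ <;> omega
    refine List.mem_map.mpr ⟨i, PySem.List.mem_pyRange_one.mpr ⟨h0i, hilt⟩, ?_⟩
    have hval : PySem.List.pyGetD w i ' ' = a ∨ PySem.List.pyGetD w ((w.length : Int) - 1 - i) ' ' = a := by
      rcases le_total (j : Int) ((w.length : Int) - 1 - j) with hc | hc
      · left
        have : i = (j : Int) := by omega
        rw [this, PySem.List.pyGetD_eq_getElem _ _ (by omega) (by omega)]
        simpa using hja
      · right
        have : (w.length : Int) - 1 - i = (j : Int) := by omega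
        rw [this, PySem.List.pyGetD_eq_getElem _ _ (by omega) (by omega)]
        simpa using hja
    have hmemw := hsub i h0i hilt
    have hge : a ≤ min (PySem.List.pyGetD w i ' ') (PySem.List.pyGetD w ((w.length : Int) - 1 - i) ' ') :=
      hle _ hmemw
    rcases hval with h | h
    · exact le_antisymm (le_trans (min_le_left _ _) (le_of_eq h)) hge
    · exact le_antisymm (le_trans (min_le_right _ _) (le_of_eq h)) hge
  · -- a is ≤ every element of the mapped list
    intro b hb
    obtain ⟨i, hi, rfl⟩ := List.mem_map.mp hb
    obtain ⟨h0, h1⟩ := PySem.List.mem_pyRange_one.mp hi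
    exact hle _ (hsub i h0 h1)

-- A computes the singleton minimum, given enough fuel
theorem wmA_eq_min : ∀ (fuel : Nat) (w : List Char) (a : Char),
    w.length ≤ fuel → w.min? = some a → wmA fuel w = [a] := by
  intro fuel
  induction fuel with
  | zero =>
    intro w a hf hm
    have hw : w = [] := List.eq_nil_of_length_eq_zero (by omega)
    subst hw; simp [List.min?] at hm
  | succ fuel ih =>
    intro w a hf hm
    rw [wmA]
    by_cases h1 : w.length = 1
    · obtain ⟨c, rfl⟩ := List.length_eq_one_iff.mp h1
      simp only [if_pos h1]
      simp [List.min?] at hm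
      simp [PySem.List.pyGetD_zero_cons, hm]
    by_cases h2 : w.length = 2
    · obtain ⟨c, d, rfl⟩ : ∃ c d, w = [c, d] := by
        match w, h2 with | [c, d], _ => exact ⟨c, d, rfl⟩
      have hm' : min c d = a := by simpa [List.min?, List.foldl] using hm
      simp only [if_neg h1, if_pos h2, PySem.List.pyGetD_zero_cons]
      have hd1 : PySem.List.pyGetD [c, d] 1 ' ' = d := by
        simp [PySem.List.pyGetD, PySem.List.pyIdx?, PySem.List.pyGet?]
      rw [hd1, min_def] at *
      split_ifs with h <;> simp_all
    · have h0 : w.length ≠ 0 := by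
        intro h
        rw [List.eq_nil_of_length_eq_zero h] at hm
        simp [List.min?] at hm
      have h3 : 3 ≤ w.length := by omega
      simp only [if_neg h1, if_neg h2]
      have hfd : PySem.Int.floordiv (w.length : Int) 2 = (w.length : Int) / 2 :=
        @PySem.Int.floordiv_eq_ediv_of_pos (w.length : Int) 2 (by norm_num)
      rw [hfd, wmA_mins_eq_map]
      apply ih
      · rw [List.length_map, PySem.List.length_pyRange_one]
        omega
      · exact mins_min?_eq w a h3 hm

-- B computes the singleton minimum
theorem alt_foldl_eq_min (c : Char) (rest : List Char) :
    (c :: rest).foldl (fun smallest ch => if ch < smallest then ch else smallest) c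
      = rest.foldl min c := by
  have hfun : (fun (smallest ch : Char) => if ch < smallest then ch else smallest) = min := by
    funext s ch
    rw [min_def]
    by_cases h : ch < s
    · simp [h, not_le.mpr h]
    · simp [h, not_lt.mp h]
  rw [hfun]
  simp [List.foldl_cons, min_self]

-- ===== VERDICT (by name: the statement is the Claim_ definition above) =====
theorem word_min_spec : Claim_equal_word_min := by
  intro word _ hpre
  obtain ⟨c, rest, hw⟩ : ∃ c rest, word.toList = c :: rest := by
    cases h : word.toList with
    | nil => exact absurd (String.toList_eq_nil_iff.mp h) hpre
    | cons c rest => exact ⟨c, rest, rfl⟩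
  have hmin : (c :: rest).min? = some (rest.foldl min c) := rfl
  unfold Spec_word_min word_min word_min_alt
  rw [hw, wmA_eq_min _ _ _ (le_refl _) hmin]
  exact congrArg (fun x => String.ofList [x]) (alt_foldl_eq_min c rest).symm
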